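-- pv_equiv track=rewrite | github.com/ZackPaz2023/CapstoneGroup | ValidateNewData.py | valid_phone_num
-- ===== SOURCE A (Python) =====
-- def valid_phone_num(phoneNum):
--     for char in phoneNum:
--         valid_char = False
--         ascii_code = ord(char)
--         if (40 <= ascii_code <= 41):
--             valid_char = True
--         elif (48 <= ascii_code <= 57):
--             valid_char = True
--         elif (ascii_code == 45):
--             valid_char = True
--
--         if (valid_char == False):
--             return False
--
--     if (len(phoneNum) == 12):
--         return True
--     else:
--         return False
-- ===== SOURCE B (Python) =====
-- import re
--
-- _PHONE_RE = re.compile(r'[()0-9-]{12}')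
--
-- def valid_phone_num(phoneNum):
--     return bool(_PHONE_RE.fullmatch(phoneNum))
-- ===== Notes on version B (the rewrite author's own statement) =====
-- stated objective: idiomatic
-- what changed: Replaced the explicit per-character loop with ord-range branches and early return plus a separate length check by a single anchored regex fullmatch whose character class and {12} quantifier enforce both conditions at once.
import Mathlib
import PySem

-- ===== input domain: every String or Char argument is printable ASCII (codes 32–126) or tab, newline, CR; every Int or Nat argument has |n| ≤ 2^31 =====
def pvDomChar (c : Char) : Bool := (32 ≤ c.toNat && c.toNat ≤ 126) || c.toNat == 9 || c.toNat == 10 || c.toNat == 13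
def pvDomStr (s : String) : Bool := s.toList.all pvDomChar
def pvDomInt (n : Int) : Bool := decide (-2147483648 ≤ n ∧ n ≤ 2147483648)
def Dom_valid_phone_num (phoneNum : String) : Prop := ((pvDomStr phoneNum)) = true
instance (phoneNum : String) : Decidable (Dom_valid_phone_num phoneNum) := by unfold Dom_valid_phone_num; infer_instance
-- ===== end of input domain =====

-- B replaces A's explicit ord-range loop + separate length check by one anchored
-- regex fullmatch ([()0-9-]{12}); idiomatic, same cost.


-- ===== PORT A =====
-- the body of A's for-loop: branch chain over ord(char)
def pvValidCharA (c : Char) : Bool :=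
  let ascii : Int := (c.toNat : Int)
  if 40 ≤ ascii ∧ ascii ≤ 41 then true
  else if 48 ≤ ascii ∧ ascii ≤ 57 then true
  else if ascii = 45 then true
  else false

-- A's loop with its early `return False`
def pvLoopA : List Char → Bool
  | [] => true
  | c :: rest => if pvValidCharA c then pvLoopA rest else false

def valid_phone_num (phoneNum : String) : Bool :=
  if pvLoopA phoneNum.toList then
    if phoneNum.toList.length = 12 then true else false
  else false

-- ===== PORT B =====
-- regex character class [()0-9-]
def pvClassB (c : Char) : Bool :=
  c == '(' || c == ')' || ('0' ≤ c && c ≤ '9') || c == '-'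

-- fullmatch of [()0-9-]{12}: exactly 12 characters, all in the class
def valid_phone_num_alt (phoneNum : String) : Bool :=
  phoneNum.toList.length == 12 && phoneNum.toList.all pvClassB

-- ===== PRECONDITION & SPEC =====
def Spec_valid_phone_num (phoneNum : String) (out : Bool) : Prop := out = valid_phone_num_alt phoneNum
instance (phoneNum : String) (out : Bool) : Decidable (Spec_valid_phone_num phoneNum out) := by unfold Spec_valid_phone_num; infer_instance

-- ===== CLAIM (what is proved, stated in full; the proofs are below) =====
def Claim_equal_valid_phone_num : Prop := ∀ (phoneNum : String), Dom_valid_phone_num phoneNum → Spec_valid_phone_num phoneNum (valid_phone_num phoneNum)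

-- ===== LEMMAS AND PROOFS =====
theorem pvValidCharA_eq_classB (c : Char) : pvValidCharA c = pvClassB c := by
  have h : c.val.toNat = c.toNat := rfl
  rw [Bool.eq_iff_iff]
  simp only [pvValidCharA, pvClassB, Char.le_def, UInt32.le_iff_toNat_le, beq_iff_eq,
    Char.ext_iff, ← UInt32.toNat_inj, h, Bool.or_eq_true, Bool.and_eq_true,
    decide_eq_true_eq,
    show '('.val.toNat = 40 from rfl, show ')'.val.toNat = 41 from rfl,
    show '0'.val.toNat = 48 from rfl, show '9'.val.toNat = 57 from rfl,
    show '-'.val.toNat = 45 from rfl]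
  split_ifs <;> simp_all <;> omega

theorem pvLoopA_eq_all (l : List Char) : pvLoopA l = l.all pvClassB := by
  induction l with
  | nil => rfl
  | cons c rest ih =>
      simp only [pvLoopA, pvValidCharA_eq_classB, ih, List.all_cons]
      by_cases h : pvClassB c = true <;> simp [h]

-- ===== VERDICT (by name: the statement is the Claim_ definition above) =====
theorem valid_phone_num_spec : Claim_equal_valid_phone_num := by
  intro s _
  unfold Spec_valid_phone_num valid_phone_num valid_phone_num_alt
  rw [pvLoopA_eq_all]
  by_cases h : s.toList.all pvClassB = true
  · by_cases hl : s.toList.length = 12 <;> simp [h, hl, Bool.beq_eq_decide_eq]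
  · simp [h]
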